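-- pv_equiv track=rewrite | github.com/kleimkuhler/dump | Python/double_degree_array.py | double_degree_array
-- ===== SOURCE A (Python) =====
-- def double_degree_array(A, n):
--     d = {vertex: [] for vertex in range(1, n+1)}
--
--     for edge in A:
--         d[edge[0]].append(edge[1])
--         d[edge[1]].append(edge[0])
--
--     degree_sums = []
--     for vertex, neighbors in d.items():
--         degree_sum = 0
--         for neighbor in neighbors:
--             degree_sum += len(d[neighbor])
--         degree_sums.append(degree_sum)
--
--     return degree_sums
-- ===== SOURCE B (Python) =====
-- def double_degree_array(A, n):
--     # degree table by one pass over edges; no adjacency lists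
--     deg = {v: 0 for v in range(1, n + 1)}
--     for edge in A:
--         deg[edge[0]] += 1
--         deg[edge[1]] += 1
--     result = {v: 0 for v in range(1, n + 1)}
--     for edge in A:
--         result[edge[0]] += deg[edge[1]]
--         result[edge[1]] += deg[edge[0]]
--     return [result[v] for v in range(1, n + 1)]
-- ===== Notes on version B (the rewrite author's own statement) =====
-- stated objective: simpler
-- what changed: Replaces the adjacency-list dictionary and the per-vertex nested neighbor-sum loop with two flat edge passes over a degree-count table (deg then result), never materializing neighbor lists.
import Mathlib
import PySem

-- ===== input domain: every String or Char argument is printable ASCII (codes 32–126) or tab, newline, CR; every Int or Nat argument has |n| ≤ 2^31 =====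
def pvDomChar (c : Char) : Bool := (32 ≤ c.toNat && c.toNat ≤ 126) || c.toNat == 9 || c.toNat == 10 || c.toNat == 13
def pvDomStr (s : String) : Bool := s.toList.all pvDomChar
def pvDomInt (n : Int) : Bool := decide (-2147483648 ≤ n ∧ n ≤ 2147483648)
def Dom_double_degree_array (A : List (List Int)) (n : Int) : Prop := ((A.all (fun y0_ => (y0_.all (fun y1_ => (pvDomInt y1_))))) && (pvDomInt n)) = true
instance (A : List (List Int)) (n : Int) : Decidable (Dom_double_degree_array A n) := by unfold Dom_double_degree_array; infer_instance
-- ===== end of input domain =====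

-- B replaces A's adjacency-list dictionary and nested neighbor-sum loop by two flat edge passes
-- over a degree-count table (simpler: no neighbor lists are materialized).


-- ===== PORT A =====
-- d = {v: [] for v in range(1, n+1)}; for edge in A: d[edge[0]].append(edge[1]); d[edge[1]].append(edge[0])
def pvDictA (A : List (List Int)) (n : Int) : PySem.Dict Int (List Int) :=
  A.foldl (fun d edge =>
      (d.modify (PySem.List.pyGetD edge 0 0) [] (fun l => l ++ [PySem.List.pyGetD edge 1 0])).modify
        (PySem.List.pyGetD edge 1 0) [] (fun l => l ++ [PySem.List.pyGetD edge 0 0]))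
    ((PySem.List.pyRange 1 (n+1)).foldl (fun d v => d.insert v []) PySem.Dict.empty)

-- for each vertex of d in order, sum len(d[neighbor]) over its neighbor list
def double_degree_array (A : List (List Int)) (n : Int) : List Int :=
  (pvDictA A n).items.foldl (fun acc p =>
      acc ++ [p.2.foldl (fun s nbr => s + (((pvDictA A n).getD nbr []).length : Int)) 0]) []

-- ===== PORT B =====
-- deg = {v: 0}; one edge pass counting degrees; result = {v: 0}; second edge pass adding deg of the
-- other endpoint; return [result[v] for v in range(1, n+1)].
def pvDegB (A : List (List Int)) (n : Int) : PySem.Dict Int Int :=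
  A.foldl (fun d e =>
      (d.modify (PySem.List.pyGetD e 0 0) 0 (fun x => x + 1)).modify
        (PySem.List.pyGetD e 1 0) 0 (fun x => x + 1))
    ((PySem.List.pyRange 1 (n+1)).foldl (fun d v => d.insert v 0) PySem.Dict.empty)

def double_degree_array_alt (A : List (List Int)) (n : Int) : List Int :=
  (PySem.List.pyRange 1 (n+1)).map (fun v =>
    (A.foldl (fun d e =>
      (d.modify (PySem.List.pyGetD e 0 0) 0 (fun x => x + (pvDegB A n).getD (PySem.List.pyGetD e 1 0) 0)).modify
        (PySem.List.pyGetD e 1 0) 0 (fun x => x + (pvDegB A n).getD (PySem.List.pyGetD e 0 0) 0))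
      ((PySem.List.pyRange 1 (n+1)).foldl (fun d v => d.insert v 0) PySem.Dict.empty)).getD v 0)

-- ===== PRECONDITION & SPEC =====
-- Pre_ excludes exactly the inputs on which Python A raises: an edge shorter than 2 (IndexError)
-- or an edge endpoint outside 1..n (KeyError).
def Pre_double_degree_array (A : List (List Int)) (n : Int) : Prop :=
  ∀ e ∈ A, 2 ≤ e.length ∧ 1 ≤ e.getD 0 0 ∧ e.getD 0 0 ≤ n ∧ 1 ≤ e.getD 1 0 ∧ e.getD 1 0 ≤ n
instance (A : List (List Int)) (n : Int) : Decidable (Pre_double_degree_array A n) := by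
  unfold Pre_double_degree_array; infer_instance

def pvWitness_double_degree_array : List (List Int) × Int := ([[1, 2], [2, 3], [3, 3]], 3)

def Spec_double_degree_array (A : List (List Int)) (n : Int) (out : List Int) : Prop := out = double_degree_array_alt A n
instance (A : List (List Int)) (n : Int) (out : List Int) : Decidable (Spec_double_degree_array A n out) := by unfold Spec_double_degree_array; infer_instance

-- ===== CLAIM (what is proved, stated in full; the proofs are below) =====
def Claim_equal_double_degree_array : Prop := ∀ (A : List (List Int)) (n : Int), Dom_double_degree_array A n → Pre_double_degree_array A n → Spec_double_degree_array A n (double_degree_array A n)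

-- ===== LEMMAS AND PROOFS =====

-- Directed incidence pairs of the edge list, in processing order.
def pvPairs (A : List (List Int)) : List (Int × Int) :=
  A.flatMap (fun e => [(PySem.List.pyGetD e 0 0, PySem.List.pyGetD e 1 0),
                       (PySem.List.pyGetD e 1 0, PySem.List.pyGetD e 0 0)])

-- All endpoints of all edges, in processing order.
def pvKeys (A : List (List Int)) : List Int :=
  A.flatMap (fun e => [PySem.List.pyGetD e 0 0, PySem.List.pyGetD e 1 0])

-- The neighbor list A's dict holds at vertex v.
def pvAdj (A : List (List Int)) (v : Int) : List Int :=
  ((pvPairs A).filter (fun p => p.1 == v)).map Prod.snd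

lemma pvFoldA (A : List (List Int)) (d : PySem.Dict Int (List Int)) :
    A.foldl (fun d edge =>
      (d.modify (PySem.List.pyGetD edge 0 0) [] (fun l => l ++ [PySem.List.pyGetD edge 1 0])).modify
        (PySem.List.pyGetD edge 1 0) [] (fun l => l ++ [PySem.List.pyGetD edge 0 0])) d
    = (pvPairs A).foldl (fun d p => d.modify p.1 [] (fun l => l ++ [p.2])) d := by
  rw [pvPairs, List.foldl_flatMap]
  simp only [List.foldl_cons, List.foldl_nil]

lemma pvFoldDeg (A : List (List Int)) (d : PySem.Dict Int Int) :
    A.foldl (fun d e =>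
      (d.modify (PySem.List.pyGetD e 0 0) 0 (fun x => x + 1)).modify
        (PySem.List.pyGetD e 1 0) 0 (fun x => x + 1)) d
    = (pvKeys A).foldl (fun d x => d.modify x 0 (fun x => x + 1)) d := by
  rw [pvKeys, List.foldl_flatMap]
  simp only [List.foldl_cons, List.foldl_nil]

lemma pvFoldRes (A : List (List Int)) (deg d : PySem.Dict Int Int) :
    A.foldl (fun d e =>
      (d.modify (PySem.List.pyGetD e 0 0) 0 (fun x => x + deg.getD (PySem.List.pyGetD e 1 0) 0)).modify
        (PySem.List.pyGetD e 1 0) 0 (fun x => x + deg.getD (PySem.List.pyGetD e 0 0) 0)) d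
    = (pvPairs A).foldl (fun d p => d.modify p.1 0 (fun x => x + deg.getD p.2 0)) d := by
  rw [pvPairs, List.foldl_flatMap]
  simp only [List.foldl_cons, List.foldl_nil]

lemma pvZeroInit (l : List Int) (d : PySem.Dict Int Int) (h : ∀ w, d.getD w 0 = 0) (w : Int) :
    (l.foldl (fun d v => d.insert v 0) d).getD w 0 = 0 := by
  induction l generalizing d with
  | nil => exact h w
  | cons v l ih =>
      simp only [List.foldl_cons]
      refine ih _ (fun w => ?_)
      rw [PySem.Dict.getD_insert]
      split <;> [rfl; exact h w]

lemma pvItemsInit (c : Int) (x0 : List Int) :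
    ((PySem.List.pyRange 1 c).foldl (fun d v => d.insert v x0) PySem.Dict.empty).items
      = (PySem.List.pyRange 1 c).map (fun v => (v, x0)) := by
  have h := PySem.Dict.items_foldl_insert_fresh (PySem.List.pyRange 1 c)
      (fun a => a) (fun _ => x0) PySem.Dict.empty
      (fun a _ => by simp [PySem.Dict.contains_empty])
      (by simpa using PySem.List.nodup_pyRange_one 1 c)
  simpa using h

lemma pvItemsFold {m : List Int} (hm : m.Nodup) :
    ∀ (P : List (Int × Int)) (g : Int → List Int) (d : PySem.Dict Int (List Int)),
      (∀ p ∈ P, p.1 ∈ m) → d.items = m.map (fun v => (v, g v)) →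
      (P.foldl (fun d p => d.modify p.1 [] (fun l => l ++ [p.2])) d).items
        = m.map (fun v => (v, g v ++ ((P.filter (fun p => p.1 == v)).map Prod.snd))) := by
  intro P
  induction P with
  | nil =>
      intro g d _ hd
      rw [List.foldl_nil, hd]
      refine List.map_congr_left (fun v _ => ?_)
      simp
  | cons p P ih =>
      intro g d hP hd
      have hkeys : d.keys = m := by
        simp [PySem.Dict.keys, hd, List.map_map, Function.comp_def]
      have hnd : d.keys.Nodup := by rw [hkeys]; exact hm
      have hp1 : p.1 ∈ m := hP p (by simp)
      have hget : d.getD p.1 [] = g p.1 := by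
        refine PySem.Dict.getD_of_mem_items d ?_ hnd []
        rw [hd]
        exact List.mem_map_of_mem hp1
      have hcont : d.contains p.1 = true := by
        rw [PySem.Dict.contains_iff_mem_keys, hkeys]; exact hp1
      have hstep : d.modify p.1 [] (fun l => l ++ [p.2]) = d.insert p.1 (g p.1 ++ [p.2]) := by
        rw [PySem.Dict.modify, hget]
      simp only [List.foldl_cons, hstep]
      have hitems' : (d.insert p.1 (g p.1 ++ [p.2])).items
          = m.map (fun v => (v, if v = p.1 then g p.1 ++ [p.2] else g v)) := by
        rw [PySem.Dict.items_insert_of_contains d _ hcont, hd, List.map_map]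
        refine List.map_congr_left (fun v _ => ?_)
        by_cases hv : v = p.1 <;> simp [hv]
      rw [ih _ _ (fun q hq => hP q (by simp [hq])) hitems']
      refine List.map_congr_left (fun v _ => ?_)
      by_cases hv : v = p.1
      · subst hv
        simp [List.append_assoc]
      · have : (p.1 == v) = false := by simp [Ne.symm hv]
        simp [this, hv]

lemma pvFlatMapSingleton {α β : Type} (f : α → β) (l : List α) :
    l.flatMap (fun x => [f x]) = l.map f := by
  induction l with
  | nil => rfl
  | cons x l ih => simp [List.flatMap_cons, ih]

lemma pvGetDFoldRes (f : Int → Int) :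
    ∀ (P : List (Int × Int)) (d : PySem.Dict Int Int) (v : Int),
      (P.foldl (fun d p => d.modify p.1 0 (fun x => x + f p.2)) d).getD v 0
        = d.getD v 0 + ((P.filter (fun p => p.1 == v)).map (fun p => f p.2)).sum := by
  intro P
  induction P with
  | nil => intro d v; simp
  | cons p P ih =>
      intro d v
      simp only [List.foldl_cons]
      rw [ih]
      by_cases hv : v = p.1
      · subst hv
        rw [PySem.Dict.getD_modify]
        simp
        ring
      · have h1 : (p.1 == v) = false := by simp [Ne.symm hv]
        rw [PySem.Dict.getD_modify]
        simp [h1, hv]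

lemma pvAdjLen (A : List (List Int)) (v : Int) :
    ((pvPairs A).filter (fun p => p.1 == v)).length = (pvKeys A).count v := by
  induction A with
  | nil => rfl
  | cons e A ih =>
      simp only [pvPairs, pvKeys, List.flatMap_cons, List.filter_append, List.length_append,
        List.count_append] at *
      rw [ih]
      have : ∀ a b : Int, ((([(a, b), (b, a)] : List (Int × Int)).filter (fun p => p.1 == v)).length)
          = ([a, b] : List Int).count v := by
        intro a b
        by_cases ha : a = v <;> by_cases hb : b = v <;>
          simp [ha, hb]
      rw [this]

-- ===== VERDICT (by name: the statement is the Claim_ definition above) =====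
theorem double_degree_array_spec : Claim_equal_double_degree_array := by
  intro A n _ hPre
  unfold Spec_double_degree_array double_degree_array double_degree_array_alt pvDictA pvDegB
  -- endpoints are in range
  have hmem : ∀ p ∈ pvPairs A, p.1 ∈ PySem.List.pyRange 1 (n+1) ∧ p.2 ∈ PySem.List.pyRange 1 (n+1) := by
    intro p hp
    rw [pvPairs, List.mem_flatMap] at hp
    obtain ⟨e, heA, hpe⟩ := hp
    obtain ⟨-, h1, h2, h3, h4⟩ := hPre e heA
    simp only [List.mem_cons, List.not_mem_nil, or_false] at hpe
    rcases hpe with h | h <;> subst h <;>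
      constructor <;>
      · rw [PySem.List.mem_pyRange_one]
        simp only [PySem.List.pyGetD_ofNat']
        omega
  -- the A-side dict
  rw [pvFoldA]
  have hnodup := PySem.List.nodup_pyRange_one 1 (n+1)
  have hitems : ((pvPairs A).foldl (fun d p => d.modify p.1 [] (fun l => l ++ [p.2]))
      ((PySem.List.pyRange 1 (n+1)).foldl (fun d v => d.insert v []) PySem.Dict.empty)).items
      = (PySem.List.pyRange 1 (n+1)).map (fun v => (v, pvAdj A v)) := by
    rw [pvItemsFold hnodup (pvPairs A) (fun _ => []) _ (fun p hp => (hmem p hp).1) (pvItemsInit _ _)]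
    simp [pvAdj]
  set dA := (pvPairs A).foldl (fun d p => d.modify p.1 [] (fun l => l ++ [p.2]))
      ((PySem.List.pyRange 1 (n+1)).foldl (fun d v => d.insert v []) PySem.Dict.empty) with hdA
  have hkeysA : dA.keys = PySem.List.pyRange 1 (n+1) := by
    simp [PySem.Dict.keys, hitems, List.map_map, Function.comp_def]
  have hgetA : ∀ w ∈ PySem.List.pyRange 1 (n+1), dA.getD w [] = pvAdj A w := by
    intro w hw
    refine PySem.Dict.getD_of_mem_items dA ?_ (by rw [hkeysA]; exact hnodup) []
    rw [hitems]
    exact List.mem_map_of_mem hw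
  -- the B-side degree dict
  rw [pvFoldDeg]
  have hdeg : ∀ w, ((pvKeys A).foldl (fun d x => d.modify x 0 (fun x => x + 1))
      ((PySem.List.pyRange 1 (n+1)).foldl (fun d v => d.insert v 0)
        (PySem.Dict.empty : PySem.Dict Int Int))).getD w 0
      = ((pvKeys A).count w : Int) := by
    intro w
    rw [PySem.Dict.getD_foldl_modify_add_one, pvZeroInit _ _ (fun w => PySem.Dict.getD_empty w 0)]
    ring
  set deg : PySem.Dict Int Int := (pvKeys A).foldl (fun d x => d.modify x 0 (fun x => x + 1))
      ((PySem.List.pyRange 1 (n+1)).foldl (fun d v => d.insert v 0) PySem.Dict.empty) with hdegdef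
  -- the B-side result dict, read back over the range
  rw [pvFoldRes]
  have hres : ∀ v, ((pvPairs A).foldl (fun d p => d.modify p.1 0 (fun x => x + deg.getD p.2 0))
      ((PySem.List.pyRange 1 (n+1)).foldl (fun d v => d.insert v 0)
        (PySem.Dict.empty : PySem.Dict Int Int))).getD v 0
      = (((pvPairs A).filter (fun p => p.1 == v)).map (fun p => deg.getD p.2 0)).sum := by
    intro v
    rw [pvGetDFoldRes (fun x => deg.getD x 0), pvZeroInit _ _ (fun w => PySem.Dict.getD_empty w 0)]
    ring
  -- A's output is a map over d.items
  rw [PySem.List.foldl_append_eq_flatMap]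
  simp only [List.nil_append, pvFlatMapSingleton, hitems, List.map_map]
  refine List.map_congr_left (fun v hv => ?_)
  simp only [Function.comp]
  rw [hres v, PySem.List.foldl_add]
  -- both sides are sums over the incidence pairs with first component v
  simp only [pvAdj, List.map_map, zero_add]
  refine congrArg List.sum (List.map_congr_left (fun p hp => ?_))
  have hpP : p ∈ pvPairs A := List.mem_of_mem_filter hp
  have hp2 : p.2 ∈ PySem.List.pyRange 1 (n+1) := (hmem p hpP).2
  simp only [Function.comp]
  rw [hgetA p.2 hp2, hdeg p.2]
  have : (pvAdj A p.2).length = (pvKeys A).count p.2 := by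
    rw [pvAdj, List.length_map]; exact pvAdjLen A p.2
  rw [this]
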